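-- pv_equiv track=rewrite | github.com/rajivpant/ragbot | src/compiler/instructions.py | format_for_platform
-- ===== SOURCE A (Python) =====
-- PLATFORM_CONSTRAINTS = {
--     'anthropic': {
--         'name': 'Claude',
--         'max_instruction_tokens': 8000,
--         'format': 'markdown',
--         'supports_xml': True,
--         'notes': 'Claude works well with XML tags for structure'
--     },
--     'openai': {
--         'name': 'ChatGPT',
--         'max_instruction_tokens': 8000,
--         'format': 'markdown',
--         'supports_xml': False,
--         'notes': 'ChatGPT prefers concise markdown'
--     },
--     'google': {
--         'name': 'Gemini',
--         'max_instruction_tokens': 4000,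
--         'format': 'markdown',
--         'supports_xml': False,
--         'notes': 'Gemini has stricter limits, be concise'
--     },
--     'grok': {
--         'name': 'Grok',
--         'max_instruction_tokens': 4000,
--         'format': 'markdown',
--         'supports_xml': False,
--         'notes': 'Similar to ChatGPT format'
--     }
-- }
--
-- def get_platform_constraints(platform: str) -> dict:
--     """
--     Get constraints for a specific platform.
--
--     Args:
--         platform: Platform name (anthropic, openai, google, grok)
--
--     Returns:
--         Dictionary with platform constraints
--     """
--     return PLATFORM_CONSTRAINTS.get(platform, {
--         'name': platform,
--         'max_instruction_tokens': 4000,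
--         'format': 'markdown',
--         'supports_xml': False,
--         'notes': ''
--     })
--
-- def format_for_platform(instructions: str, platform: str) -> str:
--     """
--     Format instructions for a specific platform's UI.
--
--     Args:
--         instructions: Compiled instructions
--         platform: Target platform
--
--     Returns:
--         Formatted instructions string
--     """
--     constraints = get_platform_constraints(platform)
--
--     # Add platform-specific header
--     header = f"# Custom Instructions for {constraints['name']}\n\n"
--
--     # Clean up any excessive whitespace
--     lines = instructions.split('\n')
--     cleaned_lines = []
--     prev_empty = False
--
--     for line in lines:
--         is_empty = not line.strip()
--         if is_empty and prev_empty: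
--             continue
--         cleaned_lines.append(line)
--         prev_empty = is_empty
--
--     return header + '\n'.join(cleaned_lines)
-- ===== SOURCE B (Python) =====
-- _NAMES = {'anthropic': 'Claude', 'openai': 'ChatGPT', 'google': 'Gemini', 'grok': 'Grok'}
--
-- def format_for_platform(instructions: str, platform: str) -> str:
--     name = _NAMES.get(platform, platform)
--     # stage 1: group consecutive lines into maximal runs of equal blankness
--     runs = []
--     for line in instructions.split('\n'):
--         blank = not line.strip()
--         if runs and runs[-1][0] == blank:
--             runs[-1][1].append(line)
--         else:
--             runs.append((blank, [line]))
--     # stage 2: a blank run collapses to its first line, a non-blank run is kept whole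
--     kept = []
--     for blank, group in runs:
--         kept.extend(group[:1] if blank else group)
--     return f"# Custom Instructions for {name}\n\n" + '\n'.join(kept)
-- ===== Notes on version B (the rewrite author's own statement) =====
-- stated objective: alternative
-- what changed: replaces A's single flag-carrying pass by two staged passes: first group the lines into maximal runs of equal blankness, then collapse every blank run to its first line and keep non-blank runs whole
import Mathlib
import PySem

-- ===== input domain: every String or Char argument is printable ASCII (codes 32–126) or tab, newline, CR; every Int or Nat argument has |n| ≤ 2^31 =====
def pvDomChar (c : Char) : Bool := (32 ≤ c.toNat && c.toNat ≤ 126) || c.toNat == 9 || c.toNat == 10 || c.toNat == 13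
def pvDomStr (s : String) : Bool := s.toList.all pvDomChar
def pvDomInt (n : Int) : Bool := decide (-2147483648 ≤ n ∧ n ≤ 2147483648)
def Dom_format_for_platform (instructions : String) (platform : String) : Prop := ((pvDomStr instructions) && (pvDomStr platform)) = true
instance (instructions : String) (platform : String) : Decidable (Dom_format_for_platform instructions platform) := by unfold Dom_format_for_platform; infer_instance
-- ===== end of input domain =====

-- B replaces A's single flag-carrying pass by two staged passes: group the lines into maximal runs of
-- equal blankness, then collapse each blank run to its first line; same O(n) cost, different decomposition.

-- ===== PORT A =====
-- PLATFORM_CONSTRAINTS is a heterogeneous dict of dicts; format_for_platform only ever reads the 'name'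
-- field, so the lookup table is narrowed to that field (the .get default dict has name = platform).
-- Shared by both ports, since both Pythons read the same module-level constant.
def pvNames : PySem.Dict String String :=
  PySem.Dict.ofList [("anthropic", "Claude"), ("openai", "ChatGPT"), ("google", "Gemini"), ("grok", "Grok")]

-- literal port of A: split('\n'), one pass carrying prev_empty, '\n'.join, header prepended.
-- String ops go through PySem.Chars on .toList (exact); the result is rebuilt with String.ofList.
def format_for_platform (instructions : String) (platform : String) : String :=
  let name : String := PySem.Dict.getD pvNames platform platform
  let header : List Char := "# Custom Instructions for ".toList ++ name.toList ++ "\n\n".toList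
  let lines : List (List Char) := PySem.Chars.splitOn instructions.toList ['\n']
  let r := lines.foldl
    (fun (acc : List (List Char) × Bool) line =>
      let isEmpty := (PySem.Chars.strip line).isEmpty
      if isEmpty && acc.2 then acc else (acc.1 ++ [line], isEmpty))
    ([], false)
  String.ofList (header ++ PySem.Chars.join ['\n'] r.1)

-- ===== PORT B =====
-- stage-1 step of Source B: extend the last run if its blankness matches, else open a new run
def pvStep (acc : List (Bool × List (List Char))) (line : List Char) : List (Bool × List (List Char)) :=
  let blank := (PySem.Chars.strip line).isEmpty
  match acc.getLast? with
  | some (bl, g) =>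
      if bl == blank then acc.dropLast ++ [(bl, g ++ [line])] else acc ++ [(blank, [line])]
  | none => [(blank, [line])]

-- literal port of Source B: build the runs, then collapse each run (group[:1] for a blank run)
def format_for_platform_alt (instructions : String) (platform : String) : String :=
  let name : String := PySem.Dict.getD pvNames platform platform
  let header : List Char := "# Custom Instructions for ".toList ++ name.toList ++ "\n\n".toList
  let lines : List (List Char) := PySem.Chars.splitOn instructions.toList ['\n']
  let runs : List (Bool × List (List Char)) := lines.foldl pvStep []
  let kept : List (List Char) :=
    runs.foldl (fun acc bg => acc ++ (if bg.1 then bg.2.take 1 else bg.2)) []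
  String.ofList (header ++ PySem.Chars.join ['\n'] kept)

-- ===== PRECONDITION & SPEC =====
def Spec_format_for_platform (instructions : String) (platform : String) (out : String) : Prop := out = format_for_platform_alt instructions platform
instance (instructions : String) (platform : String) (out : String) : Decidable (Spec_format_for_platform instructions platform out) := by unfold Spec_format_for_platform; infer_instance

-- ===== CLAIM =====
def Claim_equal_format_for_platform : Prop := ∀ (instructions : String) (platform : String), Dom_format_for_platform instructions platform → Spec_format_for_platform instructions platform (format_for_platform instructions platform)

-- ===== LEMMAS AND PROOFS =====

-- blankness of a line, shared shorthand for the proofs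
def pvBlank (l : List Char) : Bool := (PySem.Chars.strip l).isEmpty

-- reference recursion: A's loop with the carried flag made explicit
def pvClean : Bool → List (List Char) → List (List Char)
  | _, [] => []
  | b, l :: ls => if pvBlank l && b then pvClean (pvBlank l) ls else l :: pvClean (pvBlank l) ls

-- A's foldl equals the reference recursion (in the skip branch pvBlank l = true = b, so
-- recursing with pvBlank l is the same as keeping b)
theorem pvFoldl_clean (ls : List (List Char)) :
    ∀ (acc : List (List Char)) (b : Bool),
      (ls.foldl
        (fun (acc : List (List Char) × Bool) line =>
          let isEmpty := (PySem.Chars.strip line).isEmpty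
          if isEmpty && acc.2 then acc else (acc.1 ++ [line], isEmpty))
        (acc, b)).1 = acc ++ pvClean b ls := by
  induction ls with
  | nil => intro acc b; simp [pvClean]
  | cons l ls ih =>
    intro acc b
    simp only [List.foldl_cons]
    cases hcond : ((PySem.Chars.strip l).isEmpty && b)
    · have h2 : (pvBlank l && b) = false := hcond
      simp only [Bool.false_eq_true, if_false, pvClean, h2]
      rw [ih (acc ++ [l]) ((PySem.Chars.strip l).isEmpty)]
      simp [pvBlank, List.append_assoc]
    · have h2 : (pvBlank l && b) = true := hcond
      have hb : b = true := by cases b <;> simp_all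
      have hl : pvBlank l = true := by cases hpb : pvBlank l <;> simp_all [pvBlank]
      simp only [if_true, pvClean, h2]
      rw [ih acc b]
      rw [show pvClean (pvBlank l) ls = pvClean b ls from by rw [hl, hb]]

-- the tail of B's stage-1 build once a last run (b, g) exists
def pvMerge : Bool × List (List Char) → List (List Char) → List (Bool × List (List Char))
  | bg, [] => [bg]
  | (b, g), l :: ls =>
      if pvBlank l == b then pvMerge (b, g ++ [l]) ls else (b, g) :: pvMerge (pvBlank l, [l]) ls

-- B's stage-2 collapse as a flatMap
def pvCollapse (rs : List (Bool × List (List Char))) : List (List Char) :=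
  rs.flatMap (fun bg => if bg.1 then bg.2.take 1 else bg.2)

-- B's stage-1 foldl, once a last run exists, only touches that last run: it equals pvMerge
theorem pvFoldl_merge (ls : List (List Char)) :
    ∀ (front : List (Bool × List (List Char))) (b : Bool) (g : List (List Char)),
      ls.foldl pvStep (front ++ [(b, g)]) = front ++ pvMerge (b, g) ls := by
  induction ls with
  | nil => intro front b g; simp [pvMerge]
  | cons l ls ih =>
    intro front b g
    simp only [List.foldl_cons]
    have hlast : (front ++ [(b, g)]).getLast? = some (b, g) := by simp
    by_cases h : pvBlank l = b
    · have hs : pvStep (front ++ [(b, g)]) l = front ++ [(b, g ++ [l])] := by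
        simp only [pvStep, hlast]
        rw [if_pos (by exact beq_iff_eq.mpr h.symm)]
        simp
      rw [hs, ih front b (g ++ [l])]
      simp [pvMerge, h]
    · have hs : pvStep (front ++ [(b, g)]) l = (front ++ [(b, g)]) ++ [(pvBlank l, [l])] := by
        simp only [pvStep, hlast]
        rw [if_neg (by simp; exact fun he => h he.symm)]
        rfl
      rw [hs, ih (front ++ [(b, g)]) (pvBlank l) [l]]
      simp [pvMerge, h, List.append_assoc]

-- collapsing the merged runs is A's flag recursion seeded with the last run's blankness
theorem pvCollapse_merge (ls : List (List Char)) :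
    ∀ (b : Bool) (g : List (List Char)), g ≠ [] →
      pvCollapse (pvMerge (b, g) ls) = (if b then g.take 1 else g) ++ pvClean b ls := by
  induction ls with
  | nil => intro b g _; simp [pvMerge, pvCollapse, pvClean]
  | cons l ls ih =>
    intro b g hg
    by_cases h : pvBlank l = b
    · simp only [pvMerge, h, beq_self_eq_true, if_true]
      rw [ih b (g ++ [l]) (by simp)]
      obtain ⟨g0, g', rfl⟩ := List.exists_cons_of_ne_nil hg
      cases hb : b
      · subst hb; have hbl : (pvBlank l && false) = false := by simp
        simp [pvClean, h, List.append_assoc]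
      · simp [pvClean, h, hb]
    · have hne : (pvBlank l == b) = false := by
        cases hb : pvBlank l <;> cases b <;> simp_all
      simp only [pvMerge, hne, Bool.false_eq_true, if_false]
      have hstep : pvCollapse ((b, g) :: pvMerge (pvBlank l, [l]) ls)
          = (if b then g.take 1 else g) ++ pvCollapse (pvMerge (pvBlank l, [l]) ls) := by
        simp [pvCollapse]
      rw [hstep, ih (pvBlank l) [l] (by simp)]
      have hskip : (pvBlank l && b) = false := by
        cases hb : pvBlank l <;> cases b <;> simp_all
      cases hbl : pvBlank l
      · simp [pvClean, hbl]
      · have hbf : b = false := by cases b <;> simp_all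
        simp [pvClean, hbl, hbf]

-- the whole of B's two stages equals A's flag recursion started with prev_empty = False
theorem pvStages_clean (lines : List (List Char)) :
    pvCollapse (lines.foldl pvStep []) = pvClean false lines := by
  cases lines with
  | nil => simp [pvCollapse, pvClean]
  | cons l ls =>
    have h1 : pvStep [] l = [] ++ [(pvBlank l, [l])] := by simp [pvStep, pvBlank]
    rw [List.foldl_cons, h1, pvFoldl_merge ls [] (pvBlank l) [l], List.nil_append,
      pvCollapse_merge ls (pvBlank l) [l] (by simp)]
    cases hb : pvBlank l <;> simp [pvClean, hb]

-- ===== VERDICT =====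
theorem format_for_platform_spec : Claim_equal_format_for_platform := by
  intro instructions platform _
  unfold Spec_format_for_platform format_for_platform format_for_platform_alt
  have hA := pvFoldl_clean (PySem.Chars.splitOn instructions.toList ['\n']) [] false
  have hB : ((PySem.Chars.splitOn instructions.toList ['\n']).foldl pvStep []).foldl
        (fun acc bg => acc ++ (if bg.1 then bg.2.take 1 else bg.2)) []
      = pvClean false (PySem.Chars.splitOn instructions.toList ['\n']) := by
    rw [← List.flatMap_eq_foldl]
    exact pvStages_clean _
  simp only [] at hA hB ⊢
  rw [hA, hB]
  simp
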